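-- pv_equiv track=rewrite | github.com/mfascia/Kryptos | kk.py | raised_letters_shuffle
-- ===== SOURCE A (Python) =====
-- def raised_letters_shuffle(text):
-- 	shuffled = ""
-- 	left = text
-- 	while len(left) > 3:
-- 		i = 0
-- 		tmp	= ""
-- 		while i<len(left):
-- 			if i % 7 in [3, 4, 6]:
-- 				shuffled += left[i]
-- 			else:
-- 				tmp += left[i]
-- 			i += 1
-- 		left = tmp
--
-- 	shuffled += left
-- 	return shuffled
-- ===== SOURCE B (Python) =====
-- def raised_letters_shuffle(text):
--     out = []
--     while len(text) > 3:
--         raised = []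
--         rest = []
--         for b in range(0, len(text), 7):
--             block = text[b:b+7]
--             raised.append(block[3:5] + block[6:7])
--             rest.append(block[:3] + block[5:6])
--         out.append(''.join(raised))
--         text = ''.join(rest)
--     out.append(text)
--     return ''.join(out)
-- ===== Notes on version B (the rewrite author's own statement) =====
-- stated objective: faster
-- what changed: Replaces A's per-character index-mod-7 while loop with quadratic string += accumulation by a pass that slices the text into blocks of 7 and takes fixed sub-slices (block[3:5]+block[6:7] raised, block[:3]+block[5:6] kept) of each block, collecting the passes in a list joined once at the end.
import Mathlib
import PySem

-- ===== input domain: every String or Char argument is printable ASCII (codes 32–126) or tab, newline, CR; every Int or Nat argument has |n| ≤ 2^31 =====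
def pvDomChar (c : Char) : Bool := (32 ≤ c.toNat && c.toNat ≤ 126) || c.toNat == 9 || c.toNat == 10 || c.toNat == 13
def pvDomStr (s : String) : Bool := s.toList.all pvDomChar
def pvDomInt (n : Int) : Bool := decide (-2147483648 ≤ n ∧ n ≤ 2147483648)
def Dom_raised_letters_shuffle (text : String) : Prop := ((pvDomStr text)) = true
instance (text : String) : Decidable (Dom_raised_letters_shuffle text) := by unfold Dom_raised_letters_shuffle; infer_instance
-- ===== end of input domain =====

-- B replaces A's per-character index-mod-7 scan by slicing each pass into blocks of 7 and taking
-- fixed sub-slices of every block, collecting passes in a list joined once at the end (alternative decomposition); same return value.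

-- ===== PORT A =====
-- A's inner while over index i, accumulating onto the global `shuffled` and the pass-local `tmp`
def pvInnerA (i : Nat) (l : List Char) (shuffled tmp : List Char) : List Char × List Char :=
  match l with
  | [] => (shuffled, tmp)
  | c :: cs =>
    if i % 7 = 3 ∨ i % 7 = 4 ∨ i % 7 = 6 then pvInnerA (i + 1) cs (shuffled ++ [c]) tmp
    else pvInnerA (i + 1) cs shuffled (tmp ++ [c])

theorem pvInnerA_snd_le (i : Nat) (l : List Char) (s t : List Char) :
    (pvInnerA i l s t).2.length ≤ t.length + l.length := by
  induction l generalizing i s t with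
  | nil => simp [pvInnerA]
  | cons c cs ih =>
    simp only [pvInnerA, List.length_cons]
    split
    · have := ih (i + 1) (s ++ [c]) t; omega
    · have := ih (i + 1) s (t ++ [c]); simp at this; omega

theorem pvInnerA_dec (l : List Char) (s : List Char) (h : 4 ≤ l.length) :
    (pvInnerA 0 l s []).2.length < l.length := by
  match l, h with
  | a :: b :: c :: d :: t, _ =>
    have hle := pvInnerA_snd_le 4 t (s ++ [d]) [a, b, c]
    simp [pvInnerA] at hle ⊢
    omega

-- A's outer while loop: state (shuffled, left)
def pvLoopA (shuffled left : List Char) : List Char :=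
  if _h : left.length > 3 then
    let p := pvInnerA 0 left shuffled []
    pvLoopA p.1 p.2
  else shuffled ++ left
termination_by left.length
decreasing_by exact pvInnerA_dec left shuffled (by omega)

def raised_letters_shuffle (text : String) : String := String.ofList (pvLoopA [] text.toList)

-- ===== PORT B =====
-- B's inner for over range(0, len, 7): one block of 7 per step (text[b:b+7]), fixed sub-slices of each block
def pvChunkB (l : List Char) : List Char × List Char :=
  match l with
  | [] => ([], [])
  | c :: cs =>
    let block := PySem.List.slice (c :: cs) (some 0) (some 7)
    let p := pvChunkB ((c :: cs).drop 7)
    (PySem.List.slice block (some 3) (some 5) ++ PySem.List.slice block (some 6) (some 7) ++ p.1,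
     PySem.List.slice block none (some 3) ++ PySem.List.slice block (some 5) (some 6) ++ p.2)
termination_by l.length
decreasing_by simp

theorem pvChunkB_snd_le (l : List Char) : (pvChunkB l).2.length ≤ l.length := by
  match l with
  | [] => rw [pvChunkB]
  | c :: cs =>
    have ih := pvChunkB_snd_le ((c :: cs).drop 7)
    rw [pvChunkB]
    simp [pysem] at *
    omega
termination_by l.length
decreasing_by simp

theorem pvChunkB_dec (l : List Char) (h : 4 ≤ l.length) : (pvChunkB l).2.length < l.length := by
  match l, h with
  | a :: b :: c :: d :: t, _ =>
    have hle := pvChunkB_snd_le ((a :: b :: c :: d :: t).drop 7)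
    rw [pvChunkB]
    simp [pysem] at hle ⊢
    omega

-- B's outer while loop, collecting the passes in `out` and flattening (joining) once at the end
def pvOuterB (out : List (List Char)) (text : List Char) : List Char :=
  if _h : text.length > 3 then
    let p := pvChunkB text
    pvOuterB (out ++ [p.1]) p.2
  else (out ++ [text]).flatten
termination_by text.length
decreasing_by exact pvChunkB_dec text (by omega)

def raised_letters_shuffle_alt (text : String) : String := String.ofList (pvOuterB [] text.toList)

-- ===== PRECONDITION & SPEC =====
def Spec_raised_letters_shuffle (text : String) (out : String) : Prop := out = raised_letters_shuffle_alt text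
instance (text : String) (out : String) : Decidable (Spec_raised_letters_shuffle text out) := by unfold Spec_raised_letters_shuffle; infer_instance

-- ===== CLAIM (what is proved, stated in full; the proofs are below) =====
def Claim_equal_raised_letters_shuffle : Prop := ∀ (text : String), Dom_raised_letters_shuffle text → Spec_raised_letters_shuffle text (raised_letters_shuffle text)

-- ===== LEMMAS AND PROOFS =====

-- proof-only reference: one partition pass at starting index i
def pvPass (i : Nat) (l : List Char) : List Char × List Char :=
  match l with
  | [] => ([], [])
  | c :: cs =>
    let p := pvPass (i + 1) cs
    if i % 7 = 3 ∨ i % 7 = 4 ∨ i % 7 = 6 then (c :: p.1, p.2) else (p.1, c :: p.2)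

theorem pvPass_snd_le (i : Nat) (l : List Char) : (pvPass i l).2.length ≤ l.length := by
  induction l generalizing i with
  | nil => simp [pvPass]
  | cons c cs ih =>
    simp only [pvPass, List.length_cons]
    split <;> simp <;> exact Nat.le_trans (ih _) (by omega)

theorem pvPass_dec (l : List Char) (h : 4 ≤ l.length) : (pvPass 0 l).2.length < l.length := by
  match l, h with
  | a :: b :: c :: d :: t, _ =>
    have := pvPass_snd_le 4 t
    simp [pvPass]
    omega

-- proof-only canonical recursion both ports are reduced to
def pvCanon (l : List Char) : List Char :=
  if _h : l.length ≤ 3 then l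
  else
    let p := pvPass 0 l
    p.1 ++ pvCanon p.2
termination_by l.length
decreasing_by exact pvPass_dec l (by omega)

theorem pvInnerA_eq (i : Nat) (l : List Char) (s t : List Char) :
    pvInnerA i l s t = (s ++ (pvPass i l).1, t ++ (pvPass i l).2) := by
  induction l generalizing i s t with
  | nil => simp [pvInnerA, pvPass]
  | cons c cs ih =>
    simp only [pvInnerA, pvPass]
    split <;> simp [ih]

theorem pvPass_add_seven (i : Nat) (l : List Char) : pvPass (i + 7) l = pvPass i l := by
  induction l generalizing i with
  | nil => rfl
  | cons c cs ih =>
    simp only [pvPass, Nat.add_right_comm i 7 1, ih, Nat.add_mod_right]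

theorem pvPass_seven (l : List Char) : pvPass 7 l = pvPass 0 l := pvPass_add_seven 0 l

theorem pvChunkB_nil : pvChunkB [] = ([], []) := by rw [pvChunkB]

theorem pvChunkB_eq (l : List Char) : pvChunkB l = pvPass 0 l := by
  match l with
  | [] => rw [pvChunkB]; rfl
  | [a] => rw [pvChunkB]; simp [pvPass, pvChunkB_nil, PySem.List.slice, PySem.List.clampIdx]
  | [a, b] => rw [pvChunkB]; simp [pvPass, pvChunkB_nil, PySem.List.slice, PySem.List.clampIdx]
  | [a, b, c] => rw [pvChunkB]; simp [pvPass, pvChunkB_nil, PySem.List.slice, PySem.List.clampIdx]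
  | [a, b, c, d] => rw [pvChunkB]; simp [pvPass, pvChunkB_nil, PySem.List.slice, PySem.List.clampIdx]
  | [a, b, c, d, e] => rw [pvChunkB]; simp [pvPass, pvChunkB_nil, PySem.List.slice, PySem.List.clampIdx]
  | [a, b, c, d, e, f] => rw [pvChunkB]; simp [pvPass, pvChunkB_nil, PySem.List.slice, PySem.List.clampIdx]
  | a :: b :: c :: d :: e :: f :: g :: t =>
    have ih := pvChunkB_eq (List.drop 7 (a :: b :: c :: d :: e :: f :: g :: t))
    rw [pvChunkB]
    simp only [List.drop] at ih
    simp [pvPass, ih, pvPass_seven, PySem.List.slice, PySem.List.clampIdx]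
termination_by l.length
decreasing_by simp; omega

-- A's loop reduced to the canonical recursion
theorem pvLoopA_eq (l : List Char) (s : List Char) : pvLoopA s l = s ++ pvCanon l := by
  induction l using pvCanon.induct generalizing s with
  | case1 l h =>
    rw [pvLoopA, pvCanon]
    simp [h, show ¬ l.length > 3 by omega]
  | case2 l h p ih =>
    rw [pvLoopA, pvCanon]
    simp only [show l.length > 3 by omega, dif_pos, dif_neg h]
    rw [pvInnerA_eq]
    simpa using ih (s ++ (pvPass 0 l).1)

-- B's loop reduced to the canonical recursion
theorem pvOuterB_eq (l : List Char) (out : List (List Char)) :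
    pvOuterB out l = out.flatten ++ pvCanon l := by
  induction l using pvCanon.induct generalizing out with
  | case1 l h =>
    rw [pvOuterB, pvCanon]
    simp [h, show ¬ l.length > 3 by omega]
  | case2 l h p ih =>
    rw [pvOuterB, pvCanon]
    simp only [show l.length > 3 by omega, dif_pos, dif_neg h, pvChunkB_eq]
    rw [ih]
    simp [p]

-- ===== VERDICT (by name: the statement is the Claim_ definition above) =====
theorem raised_letters_shuffle_spec : Claim_equal_raised_letters_shuffle := by
  intro text _
  unfold Spec_raised_letters_shuffle raised_letters_shuffle raised_letters_shuffle_alt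
  rw [pvLoopA_eq, pvOuterB_eq]
  simp
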